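-- pv_equiv track=rewrite | github.com/slimaboom/Conflictuator | generator/airways_generator.py | is_same_quadrant
-- ===== SOURCE A (Python) =====
-- def is_same_quadrant(direction1: str, direction2: str) -> bool:
--     """
--     Vérifie si deux directions appartiennent au même quadrant.
--     """
--     quadrant_groups = [
--         {"N", "NE", "NW"},
--         {"S", "SE", "SW"},
--         {"E", "NE", "SE"},
--         {"W", "NW", "SW"}
--     ]
--     for group in quadrant_groups:
--         if direction1 in group and direction2 in group:
--             return True
--     return False
-- ===== SOURCE B (Python) =====
-- _QUADRANTS = {
--     "N": frozenset({0}), "NE": frozenset({0, 2}), "NW": frozenset({0, 3}),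
--     "S": frozenset({1}), "SE": frozenset({1, 2}), "SW": frozenset({1, 3}),
--     "E": frozenset({2}), "W": frozenset({3}),
-- }
--
-- def is_same_quadrant(direction1: str, direction2: str) -> bool:
--     empty = frozenset()
--     return bool(_QUADRANTS.get(direction1, empty) & _QUADRANTS.get(direction2, empty))
-- ===== Notes on version B (the rewrite author's own statement) =====
-- stated objective: idiomatic
-- what changed: Replaces the scan over four quadrant groups with an inverted index: a dict mapping each valid direction to the set of quadrant indices it belongs to, returning whether the two looked-up sets intersect.
import Mathlib
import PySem

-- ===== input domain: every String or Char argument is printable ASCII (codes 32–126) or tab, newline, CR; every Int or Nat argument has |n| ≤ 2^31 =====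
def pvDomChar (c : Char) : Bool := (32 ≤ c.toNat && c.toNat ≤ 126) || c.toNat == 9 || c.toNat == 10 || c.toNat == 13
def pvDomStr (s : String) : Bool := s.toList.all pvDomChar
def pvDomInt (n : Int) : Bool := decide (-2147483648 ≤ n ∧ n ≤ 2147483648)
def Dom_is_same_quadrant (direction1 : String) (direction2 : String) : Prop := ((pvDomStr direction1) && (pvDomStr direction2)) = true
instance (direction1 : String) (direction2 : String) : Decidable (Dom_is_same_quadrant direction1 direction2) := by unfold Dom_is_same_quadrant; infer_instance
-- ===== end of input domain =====

-- B replaces A's scan over four quadrant groups by an inverted index (direction -> set of quadrant indices) and an intersection test; objective: idiomatic.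


-- ===== PORT A =====
-- for-loop with early 'return True' over the four groups = List.any
def is_same_quadrant (direction1 : String) (direction2 : String) : Bool :=
  let quadrant_groups : List (PySem.Set String) :=
    [PySem.Set.ofList ["N", "NE", "NW"],
     PySem.Set.ofList ["S", "SE", "SW"],
     PySem.Set.ofList ["E", "NE", "SE"],
     PySem.Set.ofList ["W", "NW", "SW"]]
  quadrant_groups.any (fun group =>
    PySem.Set.contains group direction1 && PySem.Set.contains group direction2)

-- ===== PORT B =====
def pvQuadrantsTable : PySem.Dict String (PySem.Set Nat) := PySem.Dict.ofList
  [("N", PySem.Set.ofList [0]), ("NE", PySem.Set.ofList [0, 2]), ("NW", PySem.Set.ofList [0, 3]),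
   ("S", PySem.Set.ofList [1]), ("SE", PySem.Set.ofList [1, 2]), ("SW", PySem.Set.ofList [1, 3]),
   ("E", PySem.Set.ofList [2]), ("W", PySem.Set.ofList [3])]

-- bool(frozenset & frozenset) = the intersection is non-empty
def is_same_quadrant_alt (direction1 : String) (direction2 : String) : Bool :=
  let empty : PySem.Set Nat := PySem.Set.empty
  !(PySem.Set.inter (PySem.Dict.getD pvQuadrantsTable direction1 empty)
      (PySem.Dict.getD pvQuadrantsTable direction2 empty)).isEmpty

-- ===== PRECONDITION & SPEC =====
def Spec_is_same_quadrant (direction1 : String) (direction2 : String) (out : Bool) : Prop := out = is_same_quadrant_alt direction1 direction2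
instance (direction1 : String) (direction2 : String) (out : Bool) : Decidable (Spec_is_same_quadrant direction1 direction2 out) := by unfold Spec_is_same_quadrant; infer_instance

-- ===== CLAIM (what is proved, stated in full; the proofs are below) =====
def Claim_equal_is_same_quadrant : Prop := ∀ (direction1 : String) (direction2 : String), Dom_is_same_quadrant direction1 direction2 → Spec_is_same_quadrant direction1 direction2 (is_same_quadrant direction1 direction2)

-- ===== LEMMAS AND PROOFS =====
-- every string is one of the eight valid directions, or none of them
theorem pv_dir_cases (d : String) :
    d = "N" ∨ d = "NE" ∨ d = "NW" ∨ d = "S" ∨ d = "SE" ∨ d = "SW" ∨ d = "E" ∨ d = "W" ∨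
      (d ≠ "N" ∧ d ≠ "NE" ∧ d ≠ "NW" ∧ d ≠ "S" ∧ d ≠ "SE" ∧ d ≠ "SW" ∧ d ≠ "E" ∧ d ≠ "W") := by
  tauto

theorem pv_getD_other (d : String) (h1 : d ≠ "N") (h2 : d ≠ "NE") (h3 : d ≠ "NW")
    (h4 : d ≠ "S") (h5 : d ≠ "SE") (h6 : d ≠ "SW") (h7 : d ≠ "E") (h8 : d ≠ "W") :
    PySem.Dict.getD pvQuadrantsTable d [] = ([] : PySem.Set Nat) := by
  have e : pvQuadrantsTable = PySem.Dict.mk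
    [("N", PySem.Set.ofList [0]), ("NE", PySem.Set.ofList [0, 2]), ("NW", PySem.Set.ofList [0, 3]),
     ("S", PySem.Set.ofList [1]), ("SE", PySem.Set.ofList [1, 2]), ("SW", PySem.Set.ofList [1, 3]),
     ("E", PySem.Set.ofList [2]), ("W", PySem.Set.ofList [3])] := by rfl
  simp [e, PySem.Dict.getD, PySem.Dict.get?, Ne.symm h1, Ne.symm h2, Ne.symm h3, Ne.symm h4,
    Ne.symm h5, Ne.symm h6, Ne.symm h7, Ne.symm h8]

theorem pv_A_left (d g : String) (h1 : d ≠ "N") (h2 : d ≠ "NE") (h3 : d ≠ "NW")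
    (h4 : d ≠ "S") (h5 : d ≠ "SE") (h6 : d ≠ "SW") (h7 : d ≠ "E") (h8 : d ≠ "W") :
    is_same_quadrant d g = false := by
  simp [is_same_quadrant, PySem.Set.contains, PySem.Set.ofList, PySem.Set.add,
    h1, h2, h3, h4, h5, h6, h7, h8]

theorem pv_A_right (d g : String) (h1 : g ≠ "N") (h2 : g ≠ "NE") (h3 : g ≠ "NW")
    (h4 : g ≠ "S") (h5 : g ≠ "SE") (h6 : g ≠ "SW") (h7 : g ≠ "E") (h8 : g ≠ "W") :
    is_same_quadrant d g = false := by
  simp [is_same_quadrant, PySem.Set.contains, PySem.Set.ofList, PySem.Set.add,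
    h1, h2, h3, h4, h5, h6, h7, h8]

theorem pv_alt_left (d g : String) (h1 : d ≠ "N") (h2 : d ≠ "NE") (h3 : d ≠ "NW")
    (h4 : d ≠ "S") (h5 : d ≠ "SE") (h6 : d ≠ "SW") (h7 : d ≠ "E") (h8 : d ≠ "W") :
    is_same_quadrant_alt d g = false := by
  simp [is_same_quadrant_alt, pv_getD_other d h1 h2 h3 h4 h5 h6 h7 h8,
    PySem.Set.inter, PySem.Set.empty]

theorem pv_alt_right (d g : String) (h1 : g ≠ "N") (h2 : g ≠ "NE") (h3 : g ≠ "NW")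
    (h4 : g ≠ "S") (h5 : g ≠ "SE") (h6 : g ≠ "SW") (h7 : g ≠ "E") (h8 : g ≠ "W") :
    is_same_quadrant_alt d g = false := by
  simp [is_same_quadrant_alt, pv_getD_other g h1 h2 h3 h4 h5 h6 h7 h8,
    PySem.Set.inter, PySem.Set.empty, PySem.Set.contains]

-- ===== VERDICT (by name: the statement is the Claim_ definition above) =====
theorem is_same_quadrant_spec : Claim_equal_is_same_quadrant := by
  intro d1 d2 _
  unfold Spec_is_same_quadrant
  rcases pv_dir_cases d1 with h1|h1|h1|h1|h1|h1|h1|h1|h1 <;>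
    rcases pv_dir_cases d2 with h2|h2|h2|h2|h2|h2|h2|h2|h2 <;>
      first
      | (subst h1; subst h2; decide)
      | (obtain ⟨a1, a2, a3, a4, a5, a6, a7, a8⟩ := h1
         rw [pv_A_left d1 d2 a1 a2 a3 a4 a5 a6 a7 a8,
             pv_alt_left d1 d2 a1 a2 a3 a4 a5 a6 a7 a8])
      | (obtain ⟨a1, a2, a3, a4, a5, a6, a7, a8⟩ := h2
         rw [pv_A_right d1 d2 a1 a2 a3 a4 a5 a6 a7 a8,
             pv_alt_right d1 d2 a1 a2 a3 a4 a5 a6 a7 a8])
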